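-- pv_equiv track=rewrite | github.com/viictor-h-amaral/Python_from_questao_olimpica_to_codigo | validacaso.py | SepararQuestoesPorNota
-- ===== SOURCE A (Python) =====
-- def SepararQuestoesPorNota(questoes):
--
-- 	notas0 = []
-- 	notas1 = []
-- 	notas2 = []
--
-- 	for indexQuestao in range( len(questoes) ):
--
-- 		match questoes[indexQuestao]:
-- 			case 0:
-- 				notas0.append(indexQuestao)
-- 			case 1:
-- 				notas1.append(indexQuestao)
-- 			case 2:
-- 				notas2.append(indexQuestao)
--
-- 	indexesSeparadosPorNota = [notas0, notas1, notas2]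
--
-- 	return indexesSeparadosPorNota
-- ===== SOURCE B (Python) =====
-- def SepararQuestoesPorNota(questoes):
-- 	return [[i for i, q in enumerate(questoes) if q == n] for n in range(3)]
-- ===== Notes on version B (the rewrite author's own statement) =====
-- stated objective: idiomatic
-- what changed: Replaces the single index-loop with a match and three mutable accumulators by three independent enumerate-scans, one filtering comprehension per nota value.
import Mathlib
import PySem

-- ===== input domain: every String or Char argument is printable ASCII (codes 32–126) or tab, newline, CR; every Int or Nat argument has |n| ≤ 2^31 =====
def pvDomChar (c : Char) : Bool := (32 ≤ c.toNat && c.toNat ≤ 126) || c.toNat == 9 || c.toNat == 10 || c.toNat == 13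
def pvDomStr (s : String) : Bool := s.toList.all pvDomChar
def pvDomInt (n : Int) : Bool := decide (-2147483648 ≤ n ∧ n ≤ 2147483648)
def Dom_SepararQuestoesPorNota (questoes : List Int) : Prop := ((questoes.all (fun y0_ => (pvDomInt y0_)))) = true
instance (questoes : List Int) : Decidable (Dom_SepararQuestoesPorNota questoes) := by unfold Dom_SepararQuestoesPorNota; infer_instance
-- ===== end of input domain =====

-- B replaces A's single index-loop+match with three independent filtering scans over enumerate (idiomatic decomposition, same cost).
-- ===== PORT A =====
def SepararQuestoesPorNota (questoes : List Int) : List (List Int) :=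
  let r := (PySem.List.pyRange 0 (PySem.List.len questoes) 1).foldl
    (fun (acc : List Int × List Int × List Int) indexQuestao =>
      let q := PySem.List.pyGetD questoes indexQuestao 0
      if q = 0 then (acc.1 ++ [indexQuestao], acc.2.1, acc.2.2)
      else if q = 1 then (acc.1, acc.2.1 ++ [indexQuestao], acc.2.2)
      else if q = 2 then (acc.1, acc.2.1, acc.2.2 ++ [indexQuestao])
      else acc)
    (([] : List Int), ([] : List Int), ([] : List Int))
  [r.1, r.2.1, r.2.2]

-- ===== PORT B =====
def SepararQuestoesPorNota_alt (questoes : List Int) : List (List Int) :=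
  (PySem.List.pyRange 0 3 1).map (fun n =>
    (PySem.List.enumerate questoes 0).filterMap
      (fun p => if p.2 = n then some p.1 else none))

-- ===== PRECONDITION & SPEC =====
def Spec_SepararQuestoesPorNota (questoes : List Int) (out : List (List Int)) : Prop := out = SepararQuestoesPorNota_alt questoes
instance (questoes : List Int) (out : List (List Int)) : Decidable (Spec_SepararQuestoesPorNota questoes out) := by unfold Spec_SepararQuestoesPorNota; infer_instance

-- ===== CLAIM (what is proved, stated in full; the proofs are below) =====
def Claim_equal_SepararQuestoesPorNota : Prop := ∀ (questoes : List Int), Dom_SepararQuestoesPorNota questoes → Spec_SepararQuestoesPorNota questoes (SepararQuestoesPorNota questoes)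

-- ===== LEMMAS AND PROOFS =====

-- The bucketing fold over any enumerate prefix appends, to each accumulator, exactly the filtered indices for its nota.
lemma foldl_buckets (es : List (Int × Int)) (a b c : List Int) :
    es.foldl
      (fun (acc : List Int × List Int × List Int) p =>
        if p.2 = 0 then (acc.1 ++ [p.1], acc.2.1, acc.2.2)
        else if p.2 = 1 then (acc.1, acc.2.1 ++ [p.1], acc.2.2)
        else if p.2 = 2 then (acc.1, acc.2.1, acc.2.2 ++ [p.1])
        else acc) (a, b, c)
    = (a ++ es.filterMap (fun p => if p.2 = 0 then some p.1 else none),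
       b ++ es.filterMap (fun p => if p.2 = 1 then some p.1 else none),
       c ++ es.filterMap (fun p => if p.2 = 2 then some p.1 else none)) := by
  induction es generalizing a b c with
  | nil => simp
  | cons p es ih =>
    simp only [List.foldl_cons, List.filterMap_cons]
    by_cases h0 : p.2 = 0
    · simp [h0, ih]
    · by_cases h1 : p.2 = 1
      · simp [h1, ih]
      · by_cases h2 : p.2 = 2
        · simp [h2, ih]
        · simp [h0, h1, h2, ih]

-- ===== VERDICT (by name: the statement is the Claim_ definition above) =====
theorem SepararQuestoesPorNota_spec : Claim_equal_SepararQuestoesPorNota := by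
  intro questoes _
  unfold Spec_SepararQuestoesPorNota SepararQuestoesPorNota SepararQuestoesPorNota_alt
  have hA : (PySem.List.enumerate questoes 0).foldl
      (fun (acc : List Int × List Int × List Int) p =>
        if p.2 = 0 then (acc.1 ++ [p.1], acc.2.1, acc.2.2)
        else if p.2 = 1 then (acc.1, acc.2.1 ++ [p.1], acc.2.2)
        else if p.2 = 2 then (acc.1, acc.2.1, acc.2.2 ++ [p.1])
        else acc) (([] : List Int), ([] : List Int), ([] : List Int))
    = (PySem.List.pyRange 0 (PySem.List.len questoes) 1).foldl
      (fun (acc : List Int × List Int × List Int) indexQuestao =>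
        let q := PySem.List.pyGetD questoes indexQuestao 0
        if q = 0 then (acc.1 ++ [indexQuestao], acc.2.1, acc.2.2)
        else if q = 1 then (acc.1, acc.2.1 ++ [indexQuestao], acc.2.2)
        else if q = 2 then (acc.1, acc.2.1, acc.2.2 ++ [indexQuestao])
        else acc) (([] : List Int), ([] : List Int), ([] : List Int)) := by
    rw [PySem.List.enumerate_eq_map_pyRange (xs := questoes) (d := 0), List.foldl_map]
  rw [show (PySem.List.pyRange 0 3 1) = [0, 1, 2] from by decide]
  simp only [List.map_cons, List.map_nil, ← hA, foldl_buckets, List.nil_append]
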